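-- pv_equiv track=rewrite | github.com/luka-waronig/ML_legal_tech_ | _simple_ngram_model_implementation_.py | extract_continuation_probabilities
-- ===== SOURCE A (Python) =====
-- def extract_continuation_probabilities(words, n):
--
--     prefix_to_ngrams = {}
--     for i in range(len(words) - (n-1)):
--         ngram = tuple(words[i:i+n])
--         prefix = ngram[:(n-1)]
--         if prefix not in prefix_to_ngrams:
--             prefix_to_ngrams[prefix] = []
--         prefix_to_ngrams[prefix].append(ngram)
--
--     big_counts_dictionary = {}
--     for prefix, ngrams in prefix_to_ngrams.items():
--         continuations = [ngram[-1] for ngram in ngrams]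
--         counts = {word: 0 for word in continuations}
--         for word in continuations:
--             counts[word] += 1
--         big_counts_dictionary[prefix] = counts
--
--     return big_counts_dictionary
-- ===== SOURCE B (Python) =====
-- def extract_continuation_probabilities(words, n):
--     result = {}
--     for i in range(len(words) - (n - 1)):
--         prefix = tuple(words[i:i + n - 1])
--         word = words[i + n - 1]
--         counts = result.setdefault(prefix, {})
--         counts[word] = counts.get(word, 0) + 1
--     return result
-- ===== Notes on version B (the rewrite author's own statement) =====
-- stated objective: simpler
-- what changed: B replaces A's two-phase pipeline (first group every ngram tuple into a prefix->list-of-ngrams dict, then a second pass that zero-initialises and counts the continuations of each prefix) with a single pass over the windows that reads the prefix and continuation word directly from the word list and increments a nested counter dict in place; no intermediate ngram lists are ever built.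
import Mathlib
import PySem

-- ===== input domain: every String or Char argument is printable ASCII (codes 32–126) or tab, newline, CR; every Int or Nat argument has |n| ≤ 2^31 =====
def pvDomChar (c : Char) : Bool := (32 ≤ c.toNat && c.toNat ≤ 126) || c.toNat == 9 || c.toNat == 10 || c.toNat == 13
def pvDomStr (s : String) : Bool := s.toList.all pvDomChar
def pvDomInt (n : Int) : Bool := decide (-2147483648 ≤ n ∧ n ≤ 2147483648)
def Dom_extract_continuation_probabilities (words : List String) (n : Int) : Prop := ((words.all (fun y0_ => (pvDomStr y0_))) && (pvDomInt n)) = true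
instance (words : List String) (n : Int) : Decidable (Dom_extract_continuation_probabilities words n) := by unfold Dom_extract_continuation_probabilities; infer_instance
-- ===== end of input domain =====

-- B builds the nested prefix -> (word -> count) dict in one pass over the windows, instead of
-- A's two phases (group ngrams per prefix, then zero-initialise and count continuations).

-- ===== PORT A =====
def extract_continuation_probabilities (words : List String) (n : Int) : List (List String × List (String × Int)) :=
  let prefixToNgrams : PySem.Dict (List String) (List (List String)) :=
    (PySem.List.pyRange 0 ((words.length : Int) - (n - 1)) 1).foldl
      (fun d i =>
        let ngram := PySem.List.slice words (some i) (some (i + n))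
        let pfx := PySem.List.slice ngram (some 0) (some (n - 1))
        -- `if prefix not in d: d[prefix] = []` then `d[prefix].append(ngram)` is d[prefix] = d.get(prefix, []) + [ngram]
        d.modify pfx [] (· ++ [ngram]))
      PySem.Dict.empty
  let big : PySem.Dict (List String) (PySem.Dict String Int) :=
    prefixToNgrams.items.foldl
      (fun b pr =>
        -- ngram[-1]; under Pre_ every ngram is nonempty, so the .getD "" default is never the value
        let continuations := pr.2.map (fun ng => (PySem.List.pyGet? ng (-1)).getD "")
        let counts0 := continuations.foldl (fun c w => c.insert w (0 : Int)) PySem.Dict.empty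
        let counts := continuations.foldl (fun c w => c.modify w 0 (· + 1)) counts0
        b.insert pr.1 counts)
      PySem.Dict.empty
  big.items.map (fun p => (p.1, p.2.items))

-- ===== PORT B =====
def extract_continuation_probabilities_alt (words : List String) (n : Int) : List (List String × List (String × Int)) :=
  let result : PySem.Dict (List String) (PySem.Dict String Int) :=
    (PySem.List.pyRange 0 ((words.length : Int) - (n - 1)) 1).foldl
      (fun d i =>
        let pfx := PySem.List.slice words (some i) (some (i + n - 1))
        -- words[i+n-1]; under Pre_ the index is in range, so the .getD "" default is never the value
        let word := (PySem.List.pyGet? words (i + n - 1)).getD ""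
        -- counts = d.setdefault(pfx, {}); counts[word] = counts.get(word, 0) + 1  (updates the dict held at pfx)
        let d1 := d.setdefault pfx PySem.Dict.empty
        let counts := d1.getD pfx PySem.Dict.empty
        d1.insert pfx (counts.insert word (counts.getD word 0 + 1)))
      PySem.Dict.empty
  result.items.map (fun p => (p.1, p.2.items))

-- ===== PRECONDITION & SPEC =====
-- Pre_ excludes exactly n ≤ 0, where the Python A always raises IndexError (ngram[-1] on an empty window).
def Pre_extract_continuation_probabilities (words : List String) (n : Int) : Prop := 1 ≤ n
instance (words : List String) (n : Int) : Decidable (Pre_extract_continuation_probabilities words n) := by unfold Pre_extract_continuation_probabilities; infer_instance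
def pvWitness_extract_continuation_probabilities : List String × Int := (["a", "b", "a", "b", "c"], 2)
def Spec_extract_continuation_probabilities (words : List String) (n : Int) (out : List (List String × List (String × Int))) : Prop := out = extract_continuation_probabilities_alt words n
instance (words : List String) (n : Int) (out : List (List String × List (String × Int))) : Decidable (Spec_extract_continuation_probabilities words n out) := by unfold Spec_extract_continuation_probabilities; infer_instance

-- ===== CLAIM (what is proved, stated in full; the proofs are below) =====
def Claim_equal_extract_continuation_probabilities : Prop := ∀ (words : List String) (n : Int), Dom_extract_continuation_probabilities words n → Pre_extract_continuation_probabilities words n → Spec_extract_continuation_probabilities words n (extract_continuation_probabilities words n)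

-- ===== LEMMAS AND PROOFS =====

-- last element of an ngram, as both ports compute it
def pvLast (xs : List String) : String := (PySem.List.pyGet? xs (-1)).getD ""

-- A's first phase, abstracted over the (prefix, ngram) pairs it processes
def pvGroup (ps : List (List String × List String)) : PySem.Dict (List String) (List (List String)) :=
  ps.foldl (fun d q => d.modify q.1 [] (· ++ [q.2])) PySem.Dict.empty

-- B's single pass, abstracted over the same pairs
def pvOne (ps : List (List String × List String)) : PySem.Dict (List String) (PySem.Dict String Int) :=
  ps.foldl (fun d q => d.modify q.1 PySem.Dict.empty (fun c => c.modify (pvLast q.2) 0 (· + 1))) PySem.Dict.empty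

-- A's per-prefix counting (zero-init then increment)
def pvCountsAB (ws : List String) : PySem.Dict String Int :=
  ws.foldl (fun c w => c.modify w 0 (· + 1)) (ws.foldl (fun c w => c.insert w (0 : Int)) PySem.Dict.empty)

theorem pvSet_update_self (s : PySem.Set String) (ws : List String) (h : ∀ w ∈ ws, w ∈ s) :
    PySem.Set.update s ws = s := by
  induction ws generalizing s with
  | nil => rfl
  | cons w ws ih =>
    have hc : s.contains w = true := (PySem.Set.contains_iff s w).mpr (h w (by simp))
    have hadd : PySem.Set.add s w = s := by simp only [PySem.Set.add, hc, if_true]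
    simp only [PySem.Set.update, List.foldl_cons] at *
    rw [hadd]; exact ih s (fun x hx => h x (by simp [hx]))

theorem pvSet_update_ofList (ws : List String) :
    PySem.Set.update (PySem.Set.ofList ws) ws = PySem.Set.ofList ws :=
  pvSet_update_self _ _ (fun w hw => by simp [PySem.Set.mem_ofList, hw])

theorem pvCounts0_getD (ws : List String) (c : PySem.Dict String Int) (v : String)
    (h : c.getD v 0 = 0) : (ws.foldl (fun c w => c.insert w (0 : Int)) c).getD v 0 = 0 := by
  induction ws generalizing c with
  | nil => simpa
  | cons w ws ih =>
    simp only [List.foldl_cons]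
    exact ih _ (by rw [PySem.Dict.getD_insert]; split <;> simp [h])

theorem pvCountsAB_eq_counter (ws : List String) : pvCountsAB ws = PySem.Dict.counter ws := by
  have h0 : (ws.foldl (fun c w => c.insert w (0 : Int)) PySem.Dict.empty).keys = PySem.Set.ofList ws := by
    rw [PySem.Dict.keys_foldl_insert ws (fun _ _ => (0:Int))]
    simp [PySem.Set.update_nil_left]
  have hk : (pvCountsAB ws).keys = PySem.Set.ofList ws := by
    unfold pvCountsAB
    rw [PySem.Dict.keys_foldl_modify, h0, pvSet_update_ofList]
  have hnd : (pvCountsAB ws).keys.Nodup := by rw [hk]; exact PySem.Set.nodup_ofList ws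
  have hg : ∀ v, (pvCountsAB ws).getD v 0 = (PySem.Dict.counter ws).getD v 0 := by
    intro v
    unfold pvCountsAB
    rw [PySem.Dict.getD_foldl_modify_add_one, PySem.Dict.getD_counter,
      pvCounts0_getD ws _ v (by simp [PySem.Dict.getD_empty])]
    ring
  apply PySem.Dict.ext
  rw [PySem.Dict.items_eq_map_keys _ hnd 0,
    PySem.Dict.items_eq_map_keys _ (PySem.Dict.nodup_keys_counter ws) 0,
    hk, PySem.Dict.keys_counter]
  exact List.map_congr_left (fun k _ => by rw [hg k])

theorem pvGroup_keys_nodup (ps : List (List String × List String)) : (pvGroup ps).keys.Nodup :=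
  PySem.Dict.nodup_keys_foldl_modify_key ps Prod.fst [] (fun _ q v => v ++ [q.2]) PySem.Dict.empty
    PySem.Dict.nodup_keys_empty

theorem pvOne_keys (ps : List (List String × List String)) : (pvOne ps).keys = (pvGroup ps).keys := by
  unfold pvOne pvGroup
  rw [PySem.Dict.keys_foldl_modify_key ps Prod.fst PySem.Dict.empty
        (fun _ q c => c.modify (pvLast q.2) 0 (· + 1)),
      PySem.Dict.keys_foldl_modify_key ps Prod.fst [] (fun _ q v => v ++ [q.2])]
  rfl

theorem pvOne_items (ps : List (List String × List String)) :
    (pvOne ps).items = (pvGroup ps).items.map (fun pr => (pr.1, PySem.Dict.counter (pr.2.map pvLast))) := by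
  induction ps using List.reverseRecOn with
  | nil => rfl
  | append_singleton ps q ih =>
    have hone : pvOne (ps ++ [q]) = (pvOne ps).insert q.1
        (((pvOne ps).getD q.1 PySem.Dict.empty).modify (pvLast q.2) 0 (· + 1)) := by
      unfold pvOne; rw [List.foldl_append]; rfl
    have hgrp : pvGroup (ps ++ [q]) = (pvGroup ps).insert q.1 ((pvGroup ps).getD q.1 [] ++ [q.2]) := by
      unfold pvGroup; rw [List.foldl_append]; rfl
    have hcont : (pvOne ps).contains q.1 = (pvGroup ps).contains q.1 := by
      rw [PySem.Dict.contains_eq_decide_mem_keys, PySem.Dict.contains_eq_decide_mem_keys, pvOne_keys]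
    have hndg := pvGroup_keys_nodup ps
    have hndo : (pvOne ps).keys.Nodup := pvOne_keys ps ▸ hndg
    by_cases hc : (pvGroup ps).contains q.1 = true
    · rw [hone, hgrp, PySem.Dict.items_insert_of_contains _ _ (hcont ▸ hc),
        PySem.Dict.items_insert_of_contains _ _ hc, ih, List.map_map, List.map_map]
      apply List.map_congr_left
      intro pr hpr
      by_cases hp' : pr.1 = q.1
      · have hp : (pr.1 == q.1) = true := by simpa using hp'
        have hpr2 : (q.1, pr.2) ∈ (pvGroup ps).items := by rw [← hp']; simpa using hpr
        have hgetg : (pvGroup ps).getD q.1 [] = pr.2 :=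
          PySem.Dict.getD_of_mem_items _ hpr2 hndg []
        have hmemo : (q.1, PySem.Dict.counter (pr.2.map pvLast)) ∈ (pvOne ps).items := by
          rw [ih, ← hp']
          simpa using List.mem_map_of_mem
            (f := fun pr : List String × List (List String) =>
              (pr.1, PySem.Dict.counter (List.map pvLast pr.2))) hpr
        have hgeto : (pvOne ps).getD q.1 PySem.Dict.empty = PySem.Dict.counter (pr.2.map pvLast) :=
          PySem.Dict.getD_of_mem_items _ hmemo hndo PySem.Dict.empty
        simp only [Function.comp_apply, hp, if_true, hgetg, hgeto, List.map_append,
          List.map_cons, List.map_nil, PySem.Dict.counter_append_singleton]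
      · have hp : (pr.1 == q.1) = false := by simpa using hp'
        simp only [Function.comp_apply, hp, Bool.false_eq_true, if_false]
    · have hc' : (pvGroup ps).contains q.1 = false := by simpa using hc
      have hco : (pvOne ps).contains q.1 = false := hcont.trans hc'
      rw [hone, hgrp, PySem.Dict.items_insert_of_not_contains _ _ hco,
        PySem.Dict.items_insert_of_not_contains _ _ hc', ih, List.map_append]
      rw [PySem.Dict.getD_of_not_contains _ _ hco, PySem.Dict.getD_of_not_contains _ _ hc']
      simp [PySem.Dict.counter]

theorem pvKey1 (words : List String) (n i : Int) (h1 : 1 ≤ n) (h0 : 0 ≤ i) :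
    PySem.List.slice (PySem.List.slice words (some i) (some (i+n))) (some 0) (some (n-1))
      = PySem.List.slice words (some i) (some (i+n-1)) := by
  rw [PySem.List.slice_toNat words h0 (by omega), PySem.List.slice_toNat words h0 (by omega),
    PySem.List.slice_zero_start, PySem.List.slice_to _ (by omega : (0:Int) ≤ n-1)]
  rw [List.take_take]
  congr 1
  omega

theorem pvKey2 (words : List String) (n i : Int) (h1 : 1 ≤ n) (h0 : 0 ≤ i)
    (h2 : i < (words.length:Int) - (n-1)) :
    pvLast (PySem.List.slice words (some i) (some (i+n)))
      = (PySem.List.pyGet? words (i+n-1)).getD "" := by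
  unfold pvLast
  rw [PySem.List.pyGet?_neg_one, PySem.List.slice_toNat words h0 (by omega)]
  have hlen : ((words.drop i.toNat).take ((i+n).toNat - i.toNat)).length = n.toNat := by
    simp [List.length_take, List.length_drop]; omega
  rw [List.getLast?_eq_getElem?, hlen]
  rw [List.getElem?_take_of_lt (by omega), List.getElem?_drop,
    PySem.List.pyGet?_of_nonneg _ (by omega : (0:Int) ≤ i+n-1)]
  have h4 : i.toNat + (n.toNat - 1) = (i+n-1).toNat := by omega
  rw [h4]

-- B's loop body (setdefault then in-place update) is one dict `modify`
theorem pvB_step (d : PySem.Dict (List String) (PySem.Dict String Int)) (k : List String) (w : String) :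
    ((d.setdefault k PySem.Dict.empty).insert k
      (((d.setdefault k PySem.Dict.empty).getD k PySem.Dict.empty).insert w
        (((d.setdefault k PySem.Dict.empty).getD k PySem.Dict.empty).getD w 0 + 1)))
    = d.modify k PySem.Dict.empty (fun c => c.modify w 0 (· + 1)) := by
  by_cases hc : d.contains k = true
  · rw [PySem.Dict.setdefault_of_contains _ _ hc]
    rfl
  · have hc' : d.contains k = false := by simpa using hc
    rw [PySem.Dict.setdefault_of_not_contains _ _ hc']
    rw [PySem.Dict.getD_insert_self, PySem.Dict.insert_insert_self]
    show d.insert k _ = d.insert k ((d.getD k PySem.Dict.empty).modify w 0 (· + 1))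
    rw [PySem.Dict.getD_of_not_contains _ _ hc']
    rfl

-- ===== VERDICT (by name: the statement is the Claim_ definition above) =====
theorem extract_continuation_probabilities_spec : Claim_equal_extract_continuation_probabilities := by
  intro words n _ hpre
  unfold Pre_extract_continuation_probabilities at hpre
  unfold Spec_extract_continuation_probabilities
  unfold extract_continuation_probabilities extract_continuation_probabilities_alt
  simp only []
  set L := PySem.List.pyRange 0 ((words.length : Int) - (n - 1)) 1 with hL
  set ps := L.map (fun i => (PySem.List.slice words (some i) (some (i + n - 1)),
                             PySem.List.slice words (some i) (some (i + n)))) with hps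
  have hmem : ∀ i ∈ L, 0 ≤ i ∧ i < (words.length : Int) - (n - 1) := by
    intro i hi
    have := (PySem.List.mem_pyRange_one).mp hi
    omega
  have hA1 : L.foldl (fun d i =>
      d.modify (PySem.List.slice (PySem.List.slice words (some i) (some (i + n))) (some 0) (some (n - 1)))
        [] (· ++ [PySem.List.slice words (some i) (some (i + n))])) PySem.Dict.empty = pvGroup ps := by
    unfold pvGroup
    rw [hps, List.foldl_map]
    apply PySem.List.foldl_congr_mem
    intro acc i hi
    rw [pvKey1 words n i hpre (hmem i hi).1]
  have hB : L.foldl (fun d i =>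
      ((d.setdefault (PySem.List.slice words (some i) (some (i + n - 1))) PySem.Dict.empty).insert
        (PySem.List.slice words (some i) (some (i + n - 1)))
        (((d.setdefault (PySem.List.slice words (some i) (some (i + n - 1))) PySem.Dict.empty).getD
            (PySem.List.slice words (some i) (some (i + n - 1))) PySem.Dict.empty).insert
          ((PySem.List.pyGet? words (i + n - 1)).getD "")
          (((d.setdefault (PySem.List.slice words (some i) (some (i + n - 1))) PySem.Dict.empty).getD
              (PySem.List.slice words (some i) (some (i + n - 1))) PySem.Dict.empty).getD
            ((PySem.List.pyGet? words (i + n - 1)).getD "") 0 + 1)))) PySem.Dict.empty = pvOne ps := by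
    unfold pvOne
    rw [hps, List.foldl_map]
    apply PySem.List.foldl_congr_mem
    intro acc i hi
    rw [pvB_step, pvKey2 words n i hpre (hmem i hi).1 (hmem i hi).2]
  rw [hA1, hB]
  have hA2 : ((pvGroup ps).items.foldl
      (fun b (pr : List String × List (List String)) =>
        b.insert pr.1
          (List.foldl (fun c w => c.modify w 0 fun x => x + 1)
            (List.foldl (fun c w => c.insert w 0) PySem.Dict.empty
              (List.map (fun ng => (PySem.List.pyGet? ng (-1)).getD "") pr.2))
            (List.map (fun ng => (PySem.List.pyGet? ng (-1)).getD "") pr.2)))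
      PySem.Dict.empty).items
      = (pvGroup ps).items.map (fun pr => (pr.1, pvCountsAB (pr.2.map pvLast))) := by
    exact (PySem.Dict.items_foldl_insert_fresh (pvGroup ps).items Prod.fst
      (fun pr => pvCountsAB (pr.2.map pvLast)) PySem.Dict.empty
      (fun _ _ => PySem.Dict.contains_empty _) (pvGroup_keys_nodup ps)).trans (List.nil_append _)
  rw [pvOne_items, hA2, List.map_map, List.map_map]
  apply List.map_congr_left
  intro pr _
  simp only [Function.comp_apply, pvCountsAB_eq_counter]
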